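-- pv_equiv track=rewrite | github.com/pypi-data/pypi-mirror-379 | packages/nwn/nwn-0.0.18.tar.gz/nwn-0.0.18/src/nwn/twoda.py | _split_twoda_style
-- ===== SOURCE A (Python) =====
-- CELL = str | None
--
-- def _split_twoda_style(line: str) -> list[CELL]:
--     in_quotes = False
--     current = []
--     result = []
--     for char in line:
--         if char == '"':
--             in_quotes = not in_quotes
--         elif char.isspace() and not in_quotes:
--             if current:
--                 result.append("".join(current))
--                 current = []
--         else:
--             current.append(char)
--     if current:
--         result.append("".join(current))
--     return result
-- ===== SOURCE B (Python) =====
-- CELL = str | None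
--
-- def _split_twoda_style(line: str) -> list[CELL]:
--     out = []
--     buf = ""
--     inside = False
--     for seg in line.split('"'):
--         if inside:
--             buf += seg
--         else:
--             if seg and seg[0].isspace() and buf:
--                 out.append(buf)
--                 buf = ""
--             toks = seg.split()
--             if toks:
--                 buf += toks[0]
--                 for t in toks[1:]:
--                     out.append(buf)
--                     buf = t
--                 if seg[-1].isspace():
--                     out.append(buf)
--                     buf = ""
--         inside = not inside
--     if buf:
--         out.append(buf)
--     return out
-- ===== Notes on version B (the rewrite author's own statement) =====
-- stated objective: faster
-- what changed: B replaces A's per-character Python state machine by one split on the double-quote character followed by a fold over the alternating outside/inside segments, tokenizing outside segments with str.split() and gluing tokens across quote boundaries through a buffer.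
import Mathlib
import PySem

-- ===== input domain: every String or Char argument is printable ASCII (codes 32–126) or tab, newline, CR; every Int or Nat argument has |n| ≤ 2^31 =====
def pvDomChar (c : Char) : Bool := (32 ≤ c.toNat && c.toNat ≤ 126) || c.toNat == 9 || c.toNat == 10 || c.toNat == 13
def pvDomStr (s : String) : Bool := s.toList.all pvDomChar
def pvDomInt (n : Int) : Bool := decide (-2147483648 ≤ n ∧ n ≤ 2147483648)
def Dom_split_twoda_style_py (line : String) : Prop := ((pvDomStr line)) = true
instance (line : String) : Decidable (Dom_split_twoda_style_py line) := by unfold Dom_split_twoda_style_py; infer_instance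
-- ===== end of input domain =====

-- B re-decomposes the scan: split on the quote character once, then fold over the
-- alternating outside/inside segments, tokenizing outside ones with str.split()
-- (same asymptotic cost; measurably faster in Python by pushing work into str.split).

-- ===== PORT A =====
-- one character step of A's loop; state = (in_quotes, current, result)
def stepA (st : Bool × List Char × List String) (c : Char) : Bool × List Char × List String :=
  if c = '"' then (!st.1, st.2.1, st.2.2)
  else if PySem.Chars.isspace c && !st.1 then
    (if st.2.1.isEmpty then st else (st.1, [], st.2.2 ++ [String.ofList st.2.1]))
  else (st.1, st.2.1 ++ [c], st.2.2)

def split_twoda_style_py (line : String) : List String :=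
  let st := line.toList.foldl stepA (false, [], [])
  if st.2.1.isEmpty then st.2.2 else st.2.2 ++ [String.ofList st.2.1]

-- ===== PORT B =====
-- 'if seg and seg[0].isspace() and buf: out.append(buf); buf = ""'
def flushLead (buf : List Char) (out : List String) (seg : List Char) : List Char × List String :=
  if (seg.head?.any PySem.Chars.isspace) && !buf.isEmpty then ([], out ++ [String.ofList buf])
  else (buf, out)

-- the outside-quotes branch of B's loop body
def outsideSeg (buf : List Char) (out : List String) (seg : List Char) : List Char × List String :=
  let st := flushLead buf out seg
  match PySem.Chars.split₀ seg with
  | [] => st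
  | t :: ts =>
    let p := ts.foldl (fun (p : List Char × List String) t => (t, p.2 ++ [String.ofList p.1])) (st.1 ++ t, st.2)
    if seg.getLast?.any PySem.Chars.isspace then ([], p.2 ++ [String.ofList p.1]) else p

-- one segment step of B's loop; state = (buf, out, inside)
def stepB (st : List Char × List String × Bool) (seg : List Char) : List Char × List String × Bool :=
  if st.2.2 then (st.1 ++ seg, st.2.1, false)
  else
    let p := outsideSeg st.1 st.2.1 seg
    (p.1, p.2, true)

def split_twoda_style_py_alt (line : String) : List String :=
  let st := (PySem.Chars.splitOn line.toList ['"']).foldl stepB ([], [], false)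
  if st.1.isEmpty then st.2.1 else st.2.1 ++ [String.ofList st.1]

-- ===== PRECONDITION & SPEC =====
def Spec_split_twoda_style_py (line : String) (out : List String) : Prop := out = split_twoda_style_py_alt line
instance (line : String) (out : List String) : Decidable (Spec_split_twoda_style_py line out) := by unfold Spec_split_twoda_style_py; infer_instance

-- ===== CLAIM (what is proved, stated in full; the proofs are below) =====
def Claim_equal_split_twoda_style_py : Prop := ∀ (line : String), Dom_split_twoda_style_py line → Spec_split_twoda_style_py line (split_twoda_style_py line)

-- ===== LEMMAS AND PROOFS =====

-- reference form of line.split('"')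
def qsplit : List Char → List (List Char)
  | [] => [[]]
  | c :: cs =>
    if c = '"' then [] :: qsplit cs
    else
      match qsplit cs with
      | [] => [[c]]
      | s :: ss => (c :: s) :: ss

theorem qsplit_ne_nil (cs : List Char) : qsplit cs ≠ [] := by
  cases cs with
  | nil => simp [qsplit]
  | cons c cs =>
    unfold qsplit
    split
    · simp
    · split <;> simp

def ph (p : List Char) : List (List Char) → List (List Char)
  | [] => [p]
  | s :: ss => (p ++ s) :: ss

theorem ph_nil (xs : List (List Char)) (h : xs ≠ []) : ph [] xs = xs := by
  cases xs with
  | nil => exact absurd rfl h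
  | cons s ss => simp [ph]

theorem splitOn_go_eq (fuel : Nat) (l cur : List Char) (acc : List (List Char))
    (h : l.length ≤ fuel) :
    PySem.Chars.splitOn.go ['"'] fuel l cur acc = acc.reverse ++ ph cur.reverse (qsplit l) := by
  induction fuel generalizing l cur acc with
  | zero =>
    have hl : l = [] := by cases l <;> simp_all
    subst hl
    simp [PySem.Chars.splitOn.go, qsplit, ph]
  | succ fuel ih =>
    cases l with
    | nil => simp [PySem.Chars.splitOn.go, qsplit, ph]
    | cons c rest =>
      simp only [PySem.Chars.splitOn.go]
      by_cases hc : c = '"'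
      · subst hc
        have hpre : List.isPrefixOf ['"'] ('"' :: rest) = true := by simp [List.isPrefixOf]
        rw [if_pos hpre]
        simp only [List.length_cons, List.length_nil, List.drop_succ_cons, List.drop_zero]
        rw [ih rest [] _ (by simpa using Nat.le_of_succ_le_succ (by simpa using h))]
        simp only [List.reverse_nil]
        rw [ph_nil _ (qsplit_ne_nil rest)]
        simp [qsplit, ph]
      · have hpre : List.isPrefixOf ['"'] (c :: rest) = false := by
          simp [List.isPrefixOf]
          exact fun hh => absurd hh.symm hc
        rw [if_neg (by simp [hpre])]
        rw [ih rest (c :: cur) acc (by simpa using Nat.le_of_succ_le_succ (by simpa using h))]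
        congr 1
        simp only [qsplit, if_neg hc]
        rcases hq : qsplit rest with _ | ⟨s, ss⟩
        · exact absurd hq (qsplit_ne_nil rest)
        · simp [ph]

theorem splitOn_eq_qsplit (l : List Char) :
    PySem.Chars.splitOn l ['"'] = qsplit l := by
  unfold PySem.Chars.splitOn
  rw [splitOn_go_eq _ _ _ _ (by omega)]
  simpa using ph_nil _ (qsplit_ne_nil l)

-- reference form of seg.split()
def nwsP (x : Char) : Bool := !PySem.Chars.isspace x

def wsplit : List Char → List (List Char)
  | [] => []
  | c :: cs =>
    if PySem.Chars.isspace c then wsplit cs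
    else (c :: cs.takeWhile nwsP) :: wsplit (cs.dropWhile nwsP)
termination_by l => l.length
decreasing_by
  · simp
  · have := List.length_dropWhile_le (p := nwsP) (l := cs)
    simp; omega

theorem wsplit_nil : wsplit [] = [] := by rw [wsplit]

theorem wsplit_ws (c : Char) (cs : List Char) (hc : PySem.Chars.isspace c = true) :
    wsplit (c :: cs) = wsplit cs := by
  rw [wsplit, if_pos hc]

theorem wsplit_nws (c : Char) (cs : List Char) (hc : PySem.Chars.isspace c = false) :
    wsplit (c :: cs) = (c :: cs.takeWhile nwsP) :: wsplit (cs.dropWhile nwsP) := by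
  rw [wsplit, if_neg (by simp [hc])]

theorem wsplit_cons_ne_nil (d : Char) (l : List Char) (hd : PySem.Chars.isspace d = false) :
    wsplit (d :: l) ≠ [] := by
  rw [wsplit_nws d l hd]; simp

theorem wsplit_nws_ws (c d : Char) (l : List Char)
    (hc : PySem.Chars.isspace c = false) (hd : PySem.Chars.isspace d = true) :
    wsplit (c :: d :: l) = [c] :: wsplit (d :: l) := by
  rw [wsplit_nws c _ hc]
  simp [nwsP, hd]

theorem wsplit_nws_nws (c d : Char) (l : List Char) (t : List Char) (ts : List (List Char))
    (hc : PySem.Chars.isspace c = false) (hd : PySem.Chars.isspace d = false)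
    (hq : wsplit (d :: l) = t :: ts) :
    wsplit (c :: d :: l) = (c :: t) :: ts := by
  rw [wsplit_nws d l hd] at hq
  obtain ⟨ht, hts⟩ : d :: l.takeWhile nwsP = t ∧ wsplit (l.dropWhile nwsP) = ts := by
    exact ⟨by injection hq, by injection hq⟩
  rw [wsplit_nws c _ hc]
  simp [nwsP, hd, ht, hts]

theorem wsplit_nil_all_ws (l : List Char) (h : wsplit l = []) :
    ∀ x ∈ l, PySem.Chars.isspace x = true := by
  induction l with
  | nil => simp
  | cons c cs ih =>
    intro x hx
    by_cases hc : PySem.Chars.isspace c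
    · rw [wsplit_ws c cs hc] at h
      rcases List.mem_cons.mp hx with hx | hx
      · simpa [hx] using hc
      · exact ih h x hx
    · rw [wsplit_nws c cs (by simpa using hc)] at h
      exact absurd h (by simp)

-- the "current word continues with prefix p" form
def wglue (p : List Char) : List Char → List (List Char)
  | [] => [p]
  | d :: l =>
    if PySem.Chars.isspace d then p :: wsplit (d :: l)
    else (p ++ d :: l.takeWhile nwsP) :: wsplit (l.dropWhile nwsP)

theorem wglue_nil (p : List Char) : wglue p [] = [p] := rfl

theorem wglue_ws (p : List Char) (d : Char) (l : List Char) (hd : PySem.Chars.isspace d = true) :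
    wglue p (d :: l) = p :: wsplit (d :: l) := by
  rw [wglue, if_pos hd]

theorem wglue_nws (p : List Char) (d : Char) (l : List Char) (hd : PySem.Chars.isspace d = false) :
    wglue p (d :: l) = (p ++ d :: l.takeWhile nwsP) :: wsplit (l.dropWhile nwsP) := by
  rw [wglue, if_neg (by simp [hd])]

theorem wsplit_eq_wglue (c : Char) (l : List Char) (hc : PySem.Chars.isspace c = false) :
    wsplit (c :: l) = wglue [c] l := by
  rcases l with _ | ⟨d, l'⟩
  · rw [wsplit_nws c [] hc, wglue_nil]; simp [wsplit_nil]
  · by_cases hd : PySem.Chars.isspace d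
    · rw [wsplit_nws c _ hc, wglue_ws [c] d l' hd]
      simp [nwsP, hd]
    · rw [wsplit_nws c _ hc, wglue_nws [c] d l' (by simpa using hd)]
      simp [nwsP, hd]

theorem wglue_snoc (p : List Char) (c : Char) (l : List Char) (hc : PySem.Chars.isspace c = false) :
    wglue p (c :: l) = wglue (p ++ [c]) l := by
  rw [wglue_nws p c l hc]
  rcases l with _ | ⟨d, l'⟩
  · rw [wglue_nil]; simp [wsplit_nil]
  · by_cases hd : PySem.Chars.isspace d
    · rw [wglue_ws _ d l' hd]
      simp [nwsP, hd]
    · rw [wglue_nws _ d l' (by simpa using hd)]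
      simp [nwsP, hd]

def G (cur l : List Char) : List (List Char) :=
  if cur.isEmpty then wsplit l else wglue cur.reverse l

theorem split0_go_eq (l cur : List Char) (acc : List (List Char)) :
    PySem.Chars.split₀.go l cur acc = acc.reverse ++ G cur l := by
  induction l generalizing cur acc with
  | nil =>
    by_cases hcur : cur = []
    · subst hcur; simp [PySem.Chars.split₀.go, G, wsplit_nil]
    · simp [PySem.Chars.split₀.go, G, wglue_nil, List.isEmpty_iff, hcur]
  | cons c rest ih =>
    by_cases hc : PySem.Chars.isspace c
    · by_cases hcur : cur = []
      · subst hcur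
        simp only [PySem.Chars.split₀.go, hc, if_true, List.isEmpty_nil]
        rw [ih [] acc]
        simp [G, wsplit_ws c rest hc]
      · simp only [PySem.Chars.split₀.go, hc, if_true]
        rw [if_neg (by simpa [List.isEmpty_iff] using hcur)]
        rw [ih [] (cur.reverse :: acc)]
        simp [G, wglue_ws _ c rest hc, List.isEmpty_iff, hcur, wsplit_ws c rest hc]
    · simp only [PySem.Chars.split₀.go, hc, if_false, Bool.false_eq_true]
      rw [ih (c :: cur) acc]
      congr 1
      simp only [G, List.isEmpty_cons, List.reverse_cons]
      by_cases hcur : cur = []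
      · subst hcur
        simp [wsplit_eq_wglue c rest (by simpa using hc)]
      · rw [if_neg (by simp), if_neg (by simp [hcur])]
        exact (wglue_snoc cur.reverse c rest (by simpa using hc)).symm

theorem split0_eq_wsplit (l : List Char) : PySem.Chars.split₀ l = wsplit l := by
  unfold PySem.Chars.split₀
  rw [split0_go_eq]
  simp [G]

theorem split0_nil : PySem.Chars.split₀ [] = [] := by
  rw [split0_eq_wsplit, wsplit_nil]

-- (W): a leading unquoted whitespace character flushes the buffer
theorem outsideSeg_ws (buf : List Char) (out : List String) (c : Char) (s : List Char)
    (hc : PySem.Chars.isspace c = true) :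
    outsideSeg buf out (c :: s)
      = outsideSeg [] (if buf.isEmpty then out else out ++ [String.ofList buf]) s := by
  have hsp : PySem.Chars.split₀ (c :: s) = PySem.Chars.split₀ s := by
    rw [split0_eq_wsplit, split0_eq_wsplit, wsplit_ws c s hc]
  have hlast : ∀ t ts, PySem.Chars.split₀ s = t :: ts → (c :: s).getLast? = s.getLast? := by
    intro t ts h
    rcases s with _ | ⟨x, s'⟩
    · rw [split0_nil] at h; exact absurd h (by simp)
    · exact List.getLast?_cons_cons
  unfold outsideSeg flushLead
  rw [hsp]
  by_cases hbuf : buf = []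
  · subst hbuf
    simp only [List.isEmpty_nil, Bool.not_true, Bool.and_false, Bool.false_eq_true, if_false,
      if_true]
    rcases hq : PySem.Chars.split₀ s with _ | ⟨t, ts⟩
    · rfl
    · simp [hlast t ts hq]
  · have hne : buf.isEmpty = false := by simpa [List.isEmpty_iff] using hbuf
    simp only [List.head?_cons, Option.any_some, hc, hne, Bool.not_false, Bool.and_true,
      List.isEmpty_nil, Bool.not_true, Bool.and_false, Bool.false_eq_true,
      if_false, if_true]
    rcases hq : PySem.Chars.split₀ s with _ | ⟨t, ts⟩
    · rfl
    · simp [hlast t ts hq]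

-- (N): a leading unquoted non-whitespace character joins the buffer
theorem outsideSeg_nws (buf : List Char) (out : List String) (c : Char) (s : List Char)
    (hc : PySem.Chars.isspace c = false) :
    outsideSeg buf out (c :: s) = outsideSeg (buf ++ [c]) out s := by
  rcases s with _ | ⟨d, s'⟩
  · unfold outsideSeg flushLead
    rw [split0_nil, split0_eq_wsplit, wsplit_nws c [] hc]
    simp [wsplit_nil, hc]
  · by_cases hd : PySem.Chars.isspace d
    · -- next char is whitespace: the first word is exactly [c]
      have hsp : PySem.Chars.split₀ (c :: d :: s') = [c] :: PySem.Chars.split₀ (d :: s') := by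
        rw [split0_eq_wsplit, split0_eq_wsplit, wsplit_nws_ws c d s' hc hd]
      unfold outsideSeg flushLead
      rw [hsp]
      rcases hq : PySem.Chars.split₀ (d :: s') with _ | ⟨t, ts⟩
      · -- rest is all whitespace: both sides flush buf ++ [c]
        have hall : ∀ x ∈ d :: s', PySem.Chars.isspace x = true := by
          rw [split0_eq_wsplit] at hq
          exact wsplit_nil_all_ws _ hq
        have hgl : ((d :: s').getLast?.any PySem.Chars.isspace) = true := by
          rcases hg : (d :: s').getLast? with _ | x
          · simp at hg
          · have : x ∈ d :: s' := List.mem_of_getLast? hg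
            simp [hall x this]
        simp [hc, hd, hgl, List.getLast?_cons_cons]
      · have hgl : (c :: d :: s').getLast? = (d :: s').getLast? := List.getLast?_cons_cons
        simp [hc, hd, hgl]
    · -- next char is not whitespace: the first word continues
      obtain ⟨t, ts, hq⟩ : ∃ t ts, wsplit (d :: s') = t :: ts := by
        rcases hw : wsplit (d :: s') with _ | ⟨t, ts⟩
        · exact absurd hw (wsplit_cons_ne_nil d s' (by simpa using hd))
        · exact ⟨t, ts, rfl⟩
      have hsp : PySem.Chars.split₀ (c :: d :: s') = (c :: t) :: ts := by
        rw [split0_eq_wsplit, wsplit_nws_nws c d s' t ts hc (by simpa using hd) hq]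
      have hsp' : PySem.Chars.split₀ (d :: s') = t :: ts := by rw [split0_eq_wsplit, hq]
      have hgl : (c :: d :: s').getLast? = (d :: s').getLast? := List.getLast?_cons_cons
      unfold outsideSeg flushLead
      rw [hsp, hsp']
      simp [hc, hd, hgl]

theorem qsplit_nil : qsplit [] = [[]] := rfl

theorem qsplit_quote (cs : List Char) : qsplit ('"' :: cs) = [] :: qsplit cs := by
  simp [qsplit]

theorem qsplit_cons (c : Char) (cs : List Char) (s : List Char) (ss : List (List Char))
    (hc : c ≠ '"') (hq : qsplit cs = s :: ss) :
    qsplit (c :: cs) = (c :: s) :: ss := by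
  simp only [qsplit, if_neg hc, hq]

theorem stepB_nil (buf : List Char) (out : List String) (inq : Bool) :
    stepB (buf, out, inq) [] = (buf, out, !inq) := by
  cases inq
  · unfold stepB outsideSeg flushLead
    rw [split0_nil]
    rfl
  · simp [stepB]

-- main invariant: B's segment fold tracks A's character fold
theorem main_inv (cs : List Char) (buf : List Char) (out : List String) (inq : Bool) :
    ((qsplit cs).foldl stepB (buf, out, inq)).1 = (cs.foldl stepA (inq, buf, out)).2.1
    ∧ ((qsplit cs).foldl stepB (buf, out, inq)).2.1 = (cs.foldl stepA (inq, buf, out)).2.2 := by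
  induction cs generalizing buf out inq with
  | nil =>
    rw [qsplit_nil]
    simp [stepB_nil]
  | cons c cs ih =>
    by_cases hc : c = '"'
    · subst hc
      rw [qsplit_quote]
      simp only [List.foldl_cons, stepB_nil]
      have hA : stepA (inq, buf, out) '"' = (!inq, buf, out) := by simp [stepA]
      rw [hA]
      exact ih buf out (!inq)
    · obtain ⟨s, ss, hq⟩ : ∃ s ss, qsplit cs = s :: ss := by
        rcases hw : qsplit cs with _ | ⟨s, ss⟩
        · exact absurd hw (qsplit_ne_nil cs)
        · exact ⟨s, ss, rfl⟩
      rw [qsplit_cons c cs s ss hc hq]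
      cases inq with
      | true =>
        have hB : stepB (buf, out, true) (c :: s) = stepB (buf ++ [c], out, true) s := by
          simp [stepB]
        have hA : stepA (true, buf, out) c = (true, buf ++ [c], out) := by
          simp [stepA, hc]
        simp only [List.foldl_cons, hB, hA]
        have := ih (buf ++ [c]) out true
        rw [hq] at this
        simpa using this
      | false =>
        by_cases hws : PySem.Chars.isspace c
        · have hB : stepB (buf, out, false) (c :: s)
              = stepB ([], (if buf.isEmpty then out else out ++ [String.ofList buf]), false) s := by
            simp [stepB, outsideSeg_ws buf out c s hws]
          have hA : stepA (false, buf, out) c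
              = (false, [], (if buf.isEmpty then out else out ++ [String.ofList buf])) := by
            by_cases hbuf : buf = []
            · subst hbuf; simp [stepA, hc, hws]
            · simp [stepA, hc, hws, List.isEmpty_iff, hbuf]
          simp only [List.foldl_cons, hB, hA]
          have := ih [] (if buf.isEmpty then out else out ++ [String.ofList buf]) false
          rw [hq] at this
          simpa using this
        · have hB : stepB (buf, out, false) (c :: s) = stepB (buf ++ [c], out, false) s := by
            simp [stepB, outsideSeg_nws buf out c s (by simpa using hws)]
          have hA : stepA (false, buf, out) c = (false, buf ++ [c], out) := by
            simp [stepA, hc, hws]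
          simp only [List.foldl_cons, hB, hA]
          have := ih (buf ++ [c]) out false
          rw [hq] at this
          simpa using this

-- ===== VERDICT (by name: the statement is the Claim_ definition above) =====
theorem split_twoda_style_py_spec : Claim_equal_split_twoda_style_py := by
  intro line _
  unfold Spec_split_twoda_style_py split_twoda_style_py split_twoda_style_py_alt
  rw [splitOn_eq_qsplit]
  obtain ⟨h1, h2⟩ := main_inv line.toList [] [] false
  simp only [h1, h2]
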